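-- pv_equiv track=rewrite | github.com/alessandro-maccario/dsa_python | src/heaps_stacks_queues/224.basic_calculator.py | merge_consecutive_value
-- ===== SOURCE A (Python) =====
-- from typing import List
--
-- def merge_consecutive_value(s: List[str]) -> List[str]:
--     """
--     For consecutive integer strings in the list, group them together as one string.
--
--     Parameters
--     ----------
--     List : list
--         An array of integer represented as string.
--
--     Returns
--     -------
--     List[str]
--         An array of integer represented as string where consecutive integer strings are concatenated together to be considered as one value.
--
--     Examples
--     --------
--     ->  ['1', '1', '+', '1'] -> ['11', '+', '1']
--     """
--     output = []
--     # if multiple characters are consecutively available, add them together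
--     buffer = []
--
--     for char in s:
--         if char not in ("+", "-", "*", "/", "(", ")"):
--             buffer.append(char)
--         else:
--             current_output = "".join(buffer)
--             if current_output:
--                 # append the concatenated value to the output
--                 output.append(current_output)
--             # append the operator
--             output.append(char)
--             # reset the buffer
--             buffer = []
--
--     # if something is still available in the buffer, just extend the current list
--     if buffer:
--         merge_buffer_consecutive_values = "".join(buffer)
--         output.append(merge_buffer_consecutive_values)
--
--     return output
-- ===== SOURCE B (Python) =====
-- OPS = ("+", "-", "*", "/", "(", ")")
--
--
-- def merge_consecutive_value(s):
--     """Run-splitting scan: emit operators one by one; join each maximal run of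
--     non-operator tokens into a single string, dropping a run that joins to ''."""
--     out = []
--     i, n = 0, len(s)
--     while i < n:
--         if s[i] in OPS:
--             out.append(s[i])
--             i += 1
--         else:
--             j = i + 1
--             while j < n and s[j] not in OPS:
--                 j += 1
--             merged = "".join(s[i:j])
--             if merged:
--                 out.append(merged)
--             i = j
--     return out
-- ===== Notes on version B (the rewrite author's own statement) =====
-- stated objective: alternative
-- what changed: B replaces A's token-by-token buffer with flush-on-operator plus a special end-of-list flush by an index scan that finds each maximal run of non-operator tokens and joins the whole run at once, dropping empty joins uniformly.
-- intended difference: On lists whose trailing maximal run of non-operator tokens consists only of empty strings, A appends '' to the output (its final flush tests buffer non-emptiness instead of the joined value, unlike its in-loop flush), while B drops the empty join there exactly as it does everywhere else, which is the intended uniform behaviour. — e.g. on merge_consecutive_value(["1", "+", ""]): A returns ["1", "+", ""], B returns ["1", "+"]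
import Mathlib
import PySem

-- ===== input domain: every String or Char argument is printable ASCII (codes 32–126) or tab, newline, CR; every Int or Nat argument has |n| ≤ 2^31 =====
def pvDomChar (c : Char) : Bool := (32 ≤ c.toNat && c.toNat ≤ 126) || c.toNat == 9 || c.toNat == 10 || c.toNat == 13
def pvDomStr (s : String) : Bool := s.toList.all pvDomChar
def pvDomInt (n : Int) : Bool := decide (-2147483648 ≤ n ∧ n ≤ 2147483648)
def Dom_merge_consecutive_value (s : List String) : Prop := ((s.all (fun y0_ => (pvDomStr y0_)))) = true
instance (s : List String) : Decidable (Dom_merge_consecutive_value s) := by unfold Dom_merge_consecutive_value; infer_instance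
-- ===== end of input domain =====

-- B replaces A's buffer-and-flush loop by a run-splitting scan that joins each maximal
-- non-operator run at once, dropping empty joins uniformly (also at the end, unlike A: see D_).


-- the operator/paren tokens ("+", "-", "*", "/", "(", ")")
def pvOps : List String := ["+", "-", "*", "/", "(", ")"]

-- ===== PORT A =====
-- the for-loop of A, with state (output, buffer)
def mcvGoA (output buffer : List String) : List String → List String
  | [] =>
      -- 'if buffer:' — final flush tests buffer non-emptiness, not the joined value
      if buffer ≠ [] then output ++ [PySem.Str.join "" buffer] else output
  | c :: rest =>
      if ¬ (pvOps.contains c) then mcvGoA output (buffer ++ [c]) rest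
      else
        let current := PySem.Str.join "" buffer
        mcvGoA ((if current ≠ "" then output ++ [current] else output) ++ [c]) [] rest

def merge_consecutive_value (s : List String) : List String := mcvGoA [] [] s

-- ===== PORT B =====
-- Source B's outer while-loop over the remaining suffix; the inner index scan that finds the
-- end j of the current run is ported as the takeWhile/dropWhile split of that suffix.
def merge_consecutive_value_alt (s : List String) : List String :=
  match s with
  | [] => []
  | c :: rest =>
      if pvOps.contains c then c :: merge_consecutive_value_alt rest
      else
        let run := rest.takeWhile (fun t => !(pvOps.contains t))
        let merged := PySem.Str.join "" (c :: run)
        let tail := merge_consecutive_value_alt (rest.dropWhile (fun t => !(pvOps.contains t)))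
        (if merged ≠ "" then [merged] else []) ++ tail
termination_by s.length
decreasing_by
  · simp
  · simpa using Nat.lt_succ_of_le (List.length_dropWhile_le ..)

-- ===== PRECONDITION & SPEC =====
-- On lists whose trailing maximal run of non-operator tokens consists only of empty strings,
-- A appends '' to the output (its final flush tests buffer non-emptiness instead of the joined
-- value, unlike its in-loop flush), while B drops the empty join there exactly as everywhere
-- else, which is the intended uniform behaviour.
def D_merge_consecutive_value (s : List String) : Prop :=
  s.getLast? = some "" ∧
    ∀ d ∈ (s.reverse.dropWhile (fun t => t == "")).head?,
      d ∈ (["+", "-", "*", "/", "(", ")"] : List String)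
instance (s : List String) : Decidable (D_merge_consecutive_value s) := by
  unfold D_merge_consecutive_value; infer_instance

def Spec_merge_consecutive_value (s : List String) (out : List String) : Prop :=
  ¬ D_merge_consecutive_value s → out = merge_consecutive_value_alt s
instance (s : List String) (out : List String) : Decidable (Spec_merge_consecutive_value s out) := by
  unfold Spec_merge_consecutive_value; infer_instance

def pvDiffWitness_merge_consecutive_value : List String := ["1", "+", ""]
def pvDiffWitnessOut_merge_consecutive_value : (List String) × (List String) :=
  (["1", "+", ""], ["1", "+"])

-- ===== CLAIM =====
def Claim_unchanged_merge_consecutive_value : Prop :=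
  ∀ (s : List String), Dom_merge_consecutive_value s →
    Spec_merge_consecutive_value s (merge_consecutive_value s)
def Claim_changed_merge_consecutive_value : Prop :=
  Dom_merge_consecutive_value (pvDiffWitness_merge_consecutive_value) ∧
  D_merge_consecutive_value (pvDiffWitness_merge_consecutive_value) ∧
  merge_consecutive_value (pvDiffWitness_merge_consecutive_value) = pvDiffWitnessOut_merge_consecutive_value.1 ∧
  merge_consecutive_value_alt (pvDiffWitness_merge_consecutive_value) = pvDiffWitnessOut_merge_consecutive_value.2 ∧
  pvDiffWitnessOut_merge_consecutive_value.1 ≠ pvDiffWitnessOut_merge_consecutive_value.2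
def Claim_exact_merge_consecutive_value : Prop :=
  ∀ (s : List String), Dom_merge_consecutive_value s → D_merge_consecutive_value s →
    merge_consecutive_value s ≠ merge_consecutive_value_alt s

-- ===== LEMMAS AND PROOFS =====

-- A with the quirk kept: like B, but the final run is emitted even when it joins to ""
def mcvQ : List String → List String
  | [] => []
  | c :: rest =>
      if pvOps.contains c then c :: mcvQ rest
      else
        let run := rest.takeWhile (fun t => !(pvOps.contains t))
        let merged := PySem.Str.join "" (c :: run)
        let tail := mcvQ (rest.dropWhile (fun t => !(pvOps.contains t)))
        if (rest.dropWhile (fun t => !(pvOps.contains t))).isEmpty then [merged]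
        else (if merged ≠ "" then [merged] else []) ++ tail
termination_by s => s.length
decreasing_by
  · simp
  · simpa using Nat.lt_succ_of_le (List.length_dropWhile_le ..)

theorem intersperse_nil_flatten (xs : List (List Char)) :
    (List.intersperse ([] : List Char) xs).flatten = xs.flatten := by
  induction xs with
  | nil => rfl
  | cons a l ih => cases l <;> simp_all [List.intersperse]

theorem join_empty_iff (l : List String) :
    PySem.Str.join "" l = "" ↔ ∀ t ∈ l, t = "" := by
  have h : (PySem.Str.join "" l).toList = (l.map String.toList).flatten := by
    rw [PySem.Str.toList_join]
    simp [PySem.Chars.join, List.intercalate, intersperse_nil_flatten]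
  rw [← String.toList_eq_nil_iff, h, List.flatten_eq_nil_iff]
  simp [String.toList_eq_nil_iff]

theorem mcvGoA_out (s : List String) : ∀ output buffer,
    mcvGoA output buffer s = output ++ mcvGoA [] buffer s := by
  induction s with
  | nil => intro out buf; simp only [mcvGoA]; split_ifs <;> simp
  | cons c rest ih =>
      intro out buf
      simp only [mcvGoA]
      split_ifs <;> (try exact ih _ _) <;> rw [ih] <;> (conv_rhs => rw [ih]) <;> try simp

theorem mcvGoA_run (r : List String) (hr : ∀ t ∈ r, pvOps.contains t = false) :
    ∀ s output buffer, mcvGoA output buffer (r ++ s) = mcvGoA output (buffer ++ r) s := by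
  induction r with
  | nil => simp
  | cons a r' ih =>
      intro s out buf
      have ha : pvOps.contains a = false := hr a (by simp)
      simp only [List.cons_append, mcvGoA, ha, Bool.false_eq_true, not_false_eq_true, if_pos]
      rw [ih (fun t ht => hr t (by simp [ht]))]
      simp

theorem join_nil_str : PySem.Str.join "" [] = "" := by decide

theorem mcvGoA_op_step (c : String) (rest out buf : List String) (hc : pvOps.contains c = true) :
    mcvGoA out buf (c :: rest) =
      out ++ (if PySem.Str.join "" buf ≠ "" then [PySem.Str.join "" buf] else []) ++ [c] ++
        mcvGoA [] [] rest := by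
  simp only [mcvGoA, hc]
  split_ifs <;> (rw [mcvGoA_out]) <;> simp_all

theorem A_eq_Q (s : List String) : merge_consecutive_value s = mcvQ s := by
  induction s using mcvQ.induct with
  | case1 => simp [merge_consecutive_value, mcvGoA, mcvQ]
  | case2 c rest hc ih =>
      show mcvGoA [] [] (c :: rest) = _
      rw [mcvGoA_op_step c rest [] [] hc]
      rw [mcvQ, if_pos hc]
      simp only [join_nil_str, ne_eq, not_true_eq_false, if_false, List.nil_append]
      rw [show mcvGoA [] [] rest = merge_consecutive_value rest from rfl, ih]
      simp
  | case3 c rest hc hemp ih =>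
      show mcvGoA [] [] (c :: rest) = _
      have hre : rest.dropWhile (fun t => !(pvOps.contains t)) = [] := by
        simpa [List.isEmpty_iff] using hemp
      have step1 : mcvGoA [] [] (c :: rest) = mcvGoA [] [c] rest := by
        simp only [mcvGoA]; rw [if_pos hc]; rfl
      have hrun : ∀ t ∈ rest.takeWhile (fun t => !(pvOps.contains t)),
          pvOps.contains t = false := fun t ht => by
        simpa using List.mem_takeWhile_imp ht
      have step2 : mcvGoA [] [c] rest =
          [PySem.Str.join "" (c :: rest.takeWhile (fun t => !(pvOps.contains t)))] := by
        conv_lhs => rw [← List.takeWhile_append_dropWhile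
          (p := fun t => !(pvOps.contains t)) (l := rest), hre]
        rw [mcvGoA_run _ hrun]
        simp [mcvGoA]
      rw [step1, step2, mcvQ, if_neg hc, if_pos hemp]
  | case4 c rest hc hemp ih =>
      show mcvGoA [] [] (c :: rest) = _
      obtain ⟨d, rest'', hd⟩ : ∃ d rest'',
          rest.dropWhile (fun t => !(pvOps.contains t)) = d :: rest'' := by
        cases h : rest.dropWhile (fun t => !(pvOps.contains t)) with
        | nil => rw [h] at hemp; simp at hemp
        | cons d t => exact ⟨d, t, rfl⟩
      have hdop : pvOps.contains d = true := by
        have := List.head?_dropWhile_not (fun t => !(pvOps.contains t)) rest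
        rw [hd] at this; simpa using this
      have hrun : ∀ t ∈ rest.takeWhile (fun t => !(pvOps.contains t)),
          pvOps.contains t = false := fun t ht => by
        simpa using List.mem_takeWhile_imp ht
      have step1 : mcvGoA [] [] (c :: rest) = mcvGoA [] [c] rest := by
        simp only [mcvGoA]; rw [if_pos hc]; rfl
      have step2 : mcvGoA [] [c] rest =
          (if PySem.Str.join "" (c :: rest.takeWhile (fun t => !(pvOps.contains t))) ≠ ""
            then [PySem.Str.join "" (c :: rest.takeWhile (fun t => !(pvOps.contains t)))]
            else []) ++ mcvGoA [] [] (d :: rest'') := by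
        conv_lhs => rw [← List.takeWhile_append_dropWhile
          (p := fun t => !(pvOps.contains t)) (l := rest), hd]
        rw [mcvGoA_run _ hrun]
        rw [mcvGoA_op_step d rest'' [] _ hdop]
        conv_rhs => rw [mcvGoA_op_step d rest'' [] [] hdop]
        simp [join_nil_str]
      have ihd : mcvGoA [] [] (d :: rest'') = mcvQ (d :: rest'') := by
        rw [← hd]; exact ih
      rw [step1, step2, ihd]
      conv_rhs => rw [mcvQ]
      rw [if_neg hc, if_neg hemp, hd]

theorem takeWhile_append_not {α : Type} (p : α → Bool) (b : α) (bs : List α)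
    (hb : p b = false) :
    ∀ (as : List α), (as ++ b :: bs).takeWhile p = as.takeWhile p := by
  intro as
  induction as with
  | nil => simp [hb]
  | cons a t ih => cases h : p a <;> simp [h, ih]

theorem D_run_iff (l : List String) :
    (∀ d ∈ (l.dropWhile (fun t => t == "")).head?,
        d ∈ (["+", "-", "*", "/", "(", ")"] : List String)) ↔
      (∀ x ∈ l.takeWhile (fun t => !(pvOps.contains t)), x = "") := by
  induction l with
  | nil => simp
  | cons a t ih =>
      by_cases ha : a = ""
      · subst ha
        simpa [List.dropWhile_cons, List.takeWhile_cons, pvOps] using ih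
      · by_cases hop : a ∈ pvOps
        · apply iff_of_true
          · intro d hd
            rw [List.dropWhile_cons_of_neg (by simpa using ha)] at hd
            simp only [List.head?_cons, Option.mem_def, Option.some.injEq] at hd
            subst hd
            simpa [pvOps] using hop
          · rw [List.takeWhile_cons_of_neg (by simpa using hop)]
            simp
        · apply iff_of_false
          · intro hall
            have := hall a (by
              rw [List.dropWhile_cons_of_neg (by simpa using ha)]
              simp)
            exact hop (by simpa [pvOps] using this)
          · intro hall
            exact ha (hall a (by
              rw [List.takeWhile_cons_of_pos (by simpa using hop)]
              simp))

theorem D_iff (s : List String) :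
    D_merge_consecutive_value s ↔
      ((s.reverse.takeWhile (fun t => !(pvOps.contains t))) ≠ [] ∧
        ∀ t ∈ s.reverse.takeWhile (fun t => !(pvOps.contains t)), t = "") := by
  unfold D_merge_consecutive_value
  rw [← List.head?_reverse]
  cases hl : s.reverse with
  | nil => simp
  | cons a t =>
      by_cases ha : a = ""
      · subst ha
        simp only [List.head?_cons, List.dropWhile_cons]
        rw [List.takeWhile_cons_of_pos (by simp [pvOps])]
        simpa using D_run_iff t
      · by_cases hop : a ∈ pvOps
        · apply iff_of_false
          · rintro ⟨h1, -⟩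
            exact ha (by simpa using h1)
          · rintro ⟨h1, -⟩
            rw [List.takeWhile_cons_of_neg (by simpa using hop)] at h1
            exact h1 rfl
        · apply iff_of_false
          · rintro ⟨h1, -⟩
            exact ha (by simpa using h1)
          · rintro ⟨-, h2⟩
            exact ha (h2 a (by
              rw [List.takeWhile_cons_of_pos (by simpa using hop)]
              simp))

theorem D_cons_op {d : String} (hd : pvOps.contains d = true) (xs ys : List String) :
    D_merge_consecutive_value (xs ++ d :: ys) ↔ D_merge_consecutive_value ys := by
  rw [D_iff, D_iff]
  have h1 : (xs ++ d :: ys).reverse = ys.reverse ++ d :: xs.reverse := by simp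
  rw [h1, takeWhile_append_not _ d xs.reverse (by simpa using hd)]

theorem D_all_nonop (c : String) (rest : List String)
    (hall : ∀ x ∈ c :: rest, pvOps.contains x = false) :
    D_merge_consecutive_value (c :: rest) ↔ ∀ t ∈ c :: rest, t = "" := by
  rw [D_iff]
  have h1 : (c :: rest).reverse.takeWhile (fun t => !(pvOps.contains t)) =
      (c :: rest).reverse := by
    apply List.takeWhile_eq_self_iff.mpr
    intro x hx
    simpa using hall x (by simpa using List.mem_reverse.mp hx)
  rw [h1]
  simp
  aesop

theorem all_nonop_of_dropWhile_nil (c : String) (rest : List String)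
    (hc : ¬ pvOps.contains c = true)
    (hre : rest.dropWhile (fun t => !(pvOps.contains t)) = []) :
    ∀ x ∈ c :: rest, pvOps.contains x = false := by
  intro x hx
  rcases List.mem_cons.mp hx with h | h
  · subst h; simpa using hc
  · have := List.dropWhile_eq_nil_iff.mp hre x h
    simpa using this

theorem merged_ne_empty_case3 (c : String) (rest : List String)
    (hc : ¬ pvOps.contains c = true)
    (hre : rest.dropWhile (fun t => !(pvOps.contains t)) = [])
    (h : ¬ D_merge_consecutive_value (c :: rest)) :
    PySem.Str.join "" (c :: rest.takeWhile (fun t => !(pvOps.contains t))) ≠ "" := by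
  have hall := all_nonop_of_dropWhile_nil c rest hc hre
  have htake : rest.takeWhile (fun t => !(pvOps.contains t)) = rest := by
    apply List.takeWhile_eq_self_iff.mpr
    intro x hx; simpa using hall x (by simp [hx])
  rw [htake]
  intro hj
  exact h ((D_all_nonop c rest hall).mpr ((join_empty_iff _).mp hj))

theorem Q_eq_alt (s : List String) (h : ¬ D_merge_consecutive_value s) :
    mcvQ s = merge_consecutive_value_alt s := by
  induction s using mcvQ.induct with
  | case1 => simp [mcvQ, merge_consecutive_value_alt]
  | case2 c rest hc ih =>
      have h' : ¬ D_merge_consecutive_value rest := fun hD =>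
        h ((D_cons_op hc [] rest).mpr hD)
      rw [mcvQ, if_pos hc]
      have hc' : c ∈ pvOps := by simpa using hc
      have ih' := ih h'
      simp [merge_consecutive_value_alt, hc', ih']
  | case3 c rest hc hemp ih =>
      have hre : rest.dropWhile (fun t => !(pvOps.contains t)) = [] := by
        simpa [List.isEmpty_iff] using hemp
      have hne := merged_ne_empty_case3 c rest hc hre h
      rw [mcvQ, if_neg hc, if_pos hemp]
      have hc' : c ∉ pvOps := by simpa using hc
      have hne' := hne; simp at hne'
      have hre2 : List.dropWhile (fun t => !decide (t ∈ pvOps)) rest = [] := by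
        simpa using hre
      simp [merge_consecutive_value_alt, hc', hne', hre2]
  | case4 c rest hc hemp ih =>
      obtain ⟨d, rest'', hd⟩ : ∃ d rest'',
          rest.dropWhile (fun t => !(pvOps.contains t)) = d :: rest'' := by
        cases hx : rest.dropWhile (fun t => !(pvOps.contains t)) with
        | nil => rw [hx] at hemp; simp at hemp
        | cons d t => exact ⟨d, t, rfl⟩
      have hdop : pvOps.contains d = true := by
        have := List.head?_dropWhile_not (fun t => !(pvOps.contains t)) rest
        rw [hd] at this; simpa using this
      have hsplit : c :: rest = (c :: rest.takeWhile (fun t => !(pvOps.contains t))) ++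
          d :: rest'' := by
        conv_lhs => rw [show rest = rest.takeWhile (fun t => !(pvOps.contains t)) ++
          rest.dropWhile (fun t => !(pvOps.contains t)) from
          (List.takeWhile_append_dropWhile).symm, hd]
        simp
      have h' : ¬ D_merge_consecutive_value
          (rest.dropWhile (fun t => !(pvOps.contains t))) := by
        rw [hd]
        intro hD
        apply h
        rw [hsplit, D_cons_op hdop]
        rw [show D_merge_consecutive_value (d :: rest'') ↔
          D_merge_consecutive_value rest'' from D_cons_op hdop [] rest''] at hD
        exact hD
      rw [mcvQ, if_neg hc, if_neg hemp]
      have hc' : c ∉ pvOps := by simpa using hc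
      have ih' := ih h'
      have hfun : (fun t : String => !decide (t ∈ pvOps)) = (fun t => !pvOps.contains t) := by
        funext t; simp
      simp [merge_consecutive_value_alt, hc']
      rw [hfun]
      exact ih'

theorem Q_eq_alt_append (s : List String) (h : D_merge_consecutive_value s) :
    mcvQ s = merge_consecutive_value_alt s ++ [""] := by
  induction s using mcvQ.induct with
  | case1 => exact absurd h (by simp [D_merge_consecutive_value])
  | case2 c rest hc ih =>
      have h' : D_merge_consecutive_value rest := (D_cons_op hc [] rest).mp h
      rw [mcvQ, if_pos hc]
      have hc' : c ∈ pvOps := by simpa using hc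
      have ih' := ih h'
      simp [merge_consecutive_value_alt, hc', ih']
  | case3 c rest hc hemp ih =>
      have hre : rest.dropWhile (fun t => !(pvOps.contains t)) = [] := by
        simpa [List.isEmpty_iff] using hemp
      have hall := all_nonop_of_dropWhile_nil c rest hc hre
      have htake : rest.takeWhile (fun t => !(pvOps.contains t)) = rest := by
        apply List.takeWhile_eq_self_iff.mpr
        intro x hx; simpa using hall x (by simp [hx])
      have hj : PySem.Str.join "" (c :: rest.takeWhile (fun t => !(pvOps.contains t))) = "" := by
        rw [htake]
        exact (join_empty_iff _).mpr ((D_all_nonop c rest hall).mp h)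
      rw [mcvQ, if_neg hc, if_pos hemp]
      have hc' : c ∉ pvOps := by simpa using hc
      have hj' := hj; simp at hj'
      have hre2 : List.dropWhile (fun t => !decide (t ∈ pvOps)) rest = [] := by
        simpa using hre
      simp [merge_consecutive_value_alt, hc', hj', hre2]
  | case4 c rest hc hemp ih =>
      obtain ⟨d, rest'', hd⟩ : ∃ d rest'',
          rest.dropWhile (fun t => !(pvOps.contains t)) = d :: rest'' := by
        cases hx : rest.dropWhile (fun t => !(pvOps.contains t)) with
        | nil => rw [hx] at hemp; simp at hemp
        | cons d t => exact ⟨d, t, rfl⟩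
      have hdop : pvOps.contains d = true := by
        have := List.head?_dropWhile_not (fun t => !(pvOps.contains t)) rest
        rw [hd] at this; simpa using this
      have hsplit : c :: rest = (c :: rest.takeWhile (fun t => !(pvOps.contains t))) ++
          d :: rest'' := by
        conv_lhs => rw [show rest = rest.takeWhile (fun t => !(pvOps.contains t)) ++
          rest.dropWhile (fun t => !(pvOps.contains t)) from
          (List.takeWhile_append_dropWhile).symm, hd]
        simp
      have h' : D_merge_consecutive_value
          (rest.dropWhile (fun t => !(pvOps.contains t))) := by
        rw [hd]
        rw [show D_merge_consecutive_value (d :: rest'') ↔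
          D_merge_consecutive_value rest'' from D_cons_op hdop [] rest'']
        rw [hsplit, D_cons_op hdop] at h
        exact h
      rw [mcvQ, if_neg hc, if_neg hemp]
      have hc' : c ∉ pvOps := by simpa using hc
      have ih' := ih h'
      have hfun : (fun t : String => !decide (t ∈ pvOps)) = (fun t => !pvOps.contains t) := by
        funext t; simp
      simp [merge_consecutive_value_alt, hc']
      rw [hfun, ih']

-- ===== VERDICT =====
theorem merge_consecutive_value_spec : Claim_unchanged_merge_consecutive_value := by
  intro s _ hD
  rw [A_eq_Q, Q_eq_alt s hD]

theorem merge_consecutive_value_changed : Claim_changed_merge_consecutive_value := by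
  unfold Claim_changed_merge_consecutive_value
  refine ⟨by decide, by decide, by decide, ?_, by decide⟩
  show merge_consecutive_value_alt ["1", "+", ""] = ["1", "+"]
  simp [merge_consecutive_value_alt, pvOps, PySem.Str.join, PySem.Chars.join,
    List.intercalate, String.ofList]
  decide

theorem merge_consecutive_value_tight : Claim_exact_merge_consecutive_value := by
  intro s _ hD heq
  have h1 := Q_eq_alt_append s hD
  have h2 := A_eq_Q s
  rw [h2, h1] at heq
  have := congrArg List.length heq
  simp at this
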